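-- pv_equiv track=rewrite | github.com/mnky9800n/zork-bench | src/zork_harness/map_viewer.py | _format_game_output
-- ===== SOURCE A (Python) =====
-- def _format_game_output(text: str) -> str:
--     """Re-flow game output for display.
--
--     Frotz hard-wraps lines at ~80 columns. We join continuation lines
--     back into paragraphs so the tk Text widget can re-wrap them naturally.
--     Blank lines, indented lines (inventory lists), and short lines
--     (room names, score) are kept as-is.
--     """
--     raw_lines = text.strip().split("\n")
--     paragraphs: list[str] = []
--     current: list[str] = []
--
--     for line in raw_lines:
--         stripped = line.rstrip()
--
--         # Blank line: flush current paragraph, keep the blank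
--         if not stripped:
--             if current:
--                 paragraphs.append(" ".join(current))
--                 current = []
--             paragraphs.append("")
--             continue
--
--         # Indented lines (inventory, item lists) stay on their own
--         if stripped.startswith("  ") or stripped.startswith("\t"):
--             if current:
--                 paragraphs.append(" ".join(current))
--                 current = []
--             paragraphs.append(stripped)
--             continue
--
--         # Short lines are likely room names, score, or standalone text
--         if len(stripped) < 30:
--             if current:
--                 paragraphs.append(" ".join(current))
--                 current = []
--             paragraphs.append(stripped)
--             continue
--
--         # Otherwise it's a continuation of the current paragraph
--         current.append(stripped)
--
--     if current:
--         paragraphs.append(" ".join(current))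
--
--     return "\n".join(paragraphs)
-- ===== SOURCE B (Python) =====
-- def _format_game_output(text: str) -> str:
--     """Re-flow game output: join runs of long wrapped lines into paragraphs.
--
--     Two-phase run-scanning version: strip all lines first, then walk the
--     list with two indices, emitting each maximal run of continuation lines
--     as one joined paragraph and every other line as-is.
--     """
--     lines = [line.rstrip() for line in text.strip().split("\n")]
--
--     def is_cont(s: str) -> bool:
--         return bool(s) and not s.startswith(("  ", "\t")) and len(s) >= 30
--
--     out = []
--     i = 0
--     n = len(lines)
--     while i < n:
--         if is_cont(lines[i]):
--             j = i
--             while j < n and is_cont(lines[j]):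
--                 j += 1
--             out.append(" ".join(lines[i:j]))
--             i = j
--         else:
--             out.append(lines[i])
--             i += 1
--     return "\n".join(out)
-- ===== Notes on version B (the rewrite author's own statement) =====
-- stated objective: alternative
-- what changed: Replaces A's single fold with a flush-on-demand accumulator by a two-phase version: strip every line first, then scan with two indices emitting each maximal run of continuation lines as one joined paragraph.
import Mathlib
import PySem

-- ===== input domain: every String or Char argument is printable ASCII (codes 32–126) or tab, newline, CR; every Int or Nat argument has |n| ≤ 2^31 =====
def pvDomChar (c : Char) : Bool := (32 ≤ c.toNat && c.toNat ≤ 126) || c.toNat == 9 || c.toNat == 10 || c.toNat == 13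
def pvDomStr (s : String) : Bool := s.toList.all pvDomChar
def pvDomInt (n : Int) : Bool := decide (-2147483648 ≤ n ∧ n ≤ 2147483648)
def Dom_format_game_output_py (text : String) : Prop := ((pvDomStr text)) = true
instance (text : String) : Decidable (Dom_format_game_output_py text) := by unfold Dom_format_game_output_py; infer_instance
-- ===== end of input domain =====

-- B re-flows the same paragraphs by a two-phase run scan (strip all lines, then emit maximal
-- continuation runs) instead of A's accumulator-with-flush fold; same cost, alternative structure.

-- ===== PORT A =====
-- A's loop: state (paragraphs, pending buffer); each branch optionally flushes the buffer, then emits.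
def pvStepA (st : List (List Char) × List (List Char)) (line : List Char) :
    List (List Char) × List (List Char) :=
  let stripped := PySem.Chars.rstrip line
  if stripped = [] then
    ((if st.2 ≠ [] then st.1 ++ [PySem.Chars.join [' '] st.2] else st.1) ++ [[]], [])
  else if PySem.Chars.startswith stripped [' ', ' '] || PySem.Chars.startswith stripped ['\t'] then
    ((if st.2 ≠ [] then st.1 ++ [PySem.Chars.join [' '] st.2] else st.1) ++ [stripped], [])
  else if stripped.length < 30 then
    ((if st.2 ≠ [] then st.1 ++ [PySem.Chars.join [' '] st.2] else st.1) ++ [stripped], [])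
  else
    (st.1, st.2 ++ [stripped])

def format_game_output_py (text : String) : String :=
  let rawLines := PySem.Chars.splitOn (PySem.Chars.strip text.toList) ['\n']
  let st := rawLines.foldl pvStepA ([], [])
  let paragraphs := if st.2 ≠ [] then st.1 ++ [PySem.Chars.join [' '] st.2] else st.1
  String.ofList (PySem.Chars.join ['\n'] paragraphs)

-- ===== PORT B =====
-- is_cont on an already-rstripped line
def pvIsCont (s : List Char) : Bool :=
  !s.isEmpty && !(PySem.Chars.startswith s [' ', ' ']) && !(PySem.Chars.startswith s ['\t'])
    && decide (30 ≤ s.length)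

-- the while loop with indices i/j: emit a maximal run of continuation lines, or one line
def pvReflow : List (List Char) → List (List Char)
  | [] => []
  | l :: ls =>
    if pvIsCont l then
      PySem.Chars.join [' '] (l :: ls.takeWhile pvIsCont) :: pvReflow (ls.dropWhile pvIsCont)
    else l :: pvReflow ls
termination_by ls => ls.length
decreasing_by
  · have := List.length_dropWhile_le pvIsCont ls; simpa using Nat.lt_succ_of_le this
  · simp

def format_game_output_py_alt (text : String) : String :=
  let lines := (PySem.Chars.splitOn (PySem.Chars.strip text.toList) ['\n']).map PySem.Chars.rstrip
  String.ofList (PySem.Chars.join ['\n'] (pvReflow lines))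

-- ===== PRECONDITION & SPEC =====
def Spec_format_game_output_py (text : String) (out : String) : Prop := out = format_game_output_py_alt text
instance (text : String) (out : String) : Decidable (Spec_format_game_output_py text out) := by unfold Spec_format_game_output_py; infer_instance

-- ===== CLAIM (what is proved, stated in full; the proofs are below) =====
def Claim_equal_format_game_output_py : Prop := ∀ (text : String), Dom_format_game_output_py text → Spec_format_game_output_py text (format_game_output_py text)

-- ===== LEMMAS AND PROOFS =====

-- flush of A's pending buffer
def pvFlush (cur : List (List Char)) : List (List Char) :=
  if cur = [] then [] else [PySem.Chars.join [' '] cur]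

-- A's remaining work given a pending buffer `cur`, phrased on already-stripped lines
def pvReflowWith (cur : List (List Char)) : List (List Char) → List (List Char)
  | [] => pvFlush cur
  | s :: ss =>
    if pvIsCont s then pvReflowWith (cur ++ [s]) ss
    else pvFlush cur ++ s :: pvReflowWith [] ss

theorem pvReflow_span (ss : List (List Char)) :
    pvFlush (ss.takeWhile pvIsCont) ++ pvReflow (ss.dropWhile pvIsCont) = pvReflow ss := by
  cases ss with
  | nil => simp [pvFlush, pvReflow]
  | cons t ts =>
    by_cases h : pvIsCont t = true
    · simp [pvReflow, h, pvFlush]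
    · simp [pvReflow, h, pvFlush]

theorem pvReflowWith_eq (ss : List (List Char)) : ∀ cur,
    pvReflowWith cur ss = pvFlush (cur ++ ss.takeWhile pvIsCont) ++ pvReflow (ss.dropWhile pvIsCont) := by
  induction ss with
  | nil => intro cur; simp [pvReflowWith, pvReflow]
  | cons s ss ih =>
    intro cur
    by_cases h : pvIsCont s = true
    · simp only [pvReflowWith, h, if_pos, List.takeWhile_cons, List.dropWhile_cons,
        ih (cur ++ [s])]
      simp
    · have hpv : pvIsCont s = false := by simpa using h
      have hL : pvReflowWith cur (s :: ss) = pvFlush cur ++ s :: pvReflowWith [] ss := by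
        simp [pvReflowWith, hpv]
      rw [hL, ih [], List.nil_append, pvReflow_span ss]
      simp [hpv, pvReflow]

theorem pvReflowWith_nil_eq (ss : List (List Char)) : pvReflowWith [] ss = pvReflow ss := by
  rw [pvReflowWith_eq ss []]
  simpa using pvReflow_span ss

-- characterize a non-continuation stripped line by A's branch tests
theorem pvIsCont_false_iff (s : List Char) :
    pvIsCont s = false ↔
      (s = [] ∨ PySem.Chars.startswith s [' ', ' '] = true ∨ PySem.Chars.startswith s ['\t'] = true
        ∨ s.length < 30) := by
  simp only [pvIsCont, Bool.and_eq_false_iff, Bool.not_eq_false', List.isEmpty_iff,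
    decide_eq_false_iff_not, not_le]
  tauto

-- main invariant of A's fold
theorem pvFoldA_inv (lines : List (List Char)) : ∀ paras cur,
    (let st := lines.foldl pvStepA (paras, cur)
     if st.2 ≠ [] then st.1 ++ [PySem.Chars.join [' '] st.2] else st.1)
      = paras ++ pvReflowWith cur (lines.map PySem.Chars.rstrip) := by
  induction lines with
  | nil =>
    intro paras cur
    by_cases h : cur = [] <;> simp [pvReflowWith, pvFlush, h]
  | cons l ls ih =>
    intro paras cur
    simp only [List.foldl_cons, List.map_cons]
    set s := PySem.Chars.rstrip l with hs
    by_cases hc : pvIsCont s = true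
    · -- continuation branch of A
      have h1 : ¬ s = [] := by
        intro h; rw [h] at hc; simp [pvIsCont] at hc
      have h2 : (PySem.Chars.startswith s [' ', ' '] || PySem.Chars.startswith s ['\t']) = false := by
        simp only [pvIsCont, Bool.and_eq_true, Bool.not_eq_true'] at hc
        simp [hc.1.1.2, hc.1.2]
      have h3 : ¬ s.length < 30 := by
        simp only [pvIsCont, Bool.and_eq_true, decide_eq_true_eq] at hc; omega
      have hstep : pvStepA (paras, cur) l = (paras, cur ++ [s]) := by
        simp [pvStepA, ← hs, h1, h2, h3]
      rw [hstep, ih paras (cur ++ [s])]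
      simp [pvReflowWith, hc]
    · -- one of A's three emit-and-flush branches
      have hstep : pvStepA (paras, cur) l = (paras ++ pvFlush cur ++ [s], []) := by
        rcases (pvIsCont_false_iff s).mp (by simpa using hc) with h | h | h | h
        · simp [pvStepA, ← hs, h, pvFlush]
          by_cases hcur : cur = [] <;> simp [hcur]
        · simp [pvStepA, ← hs, h, pvFlush]
          rcases eq_or_ne s [] with h0 | h0
          · rw [h0] at h; simp [PySem.Chars.startswith] at h
          · by_cases hcur : cur = [] <;> simp [h0, hcur]
        · simp only [pvStepA, ← hs]
          rcases eq_or_ne s [] with h0 | h0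
          · rw [h0] at h; simp [PySem.Chars.startswith] at h
          · simp [h0, h, pvFlush]
            by_cases hcur : cur = [] <;> simp [hcur]
        · simp only [pvStepA, ← hs]
          rcases eq_or_ne s [] with h0 | h0
          · simp [h0, pvFlush]
            by_cases hcur : cur = [] <;> simp [hcur]
          · by_cases hsw : (PySem.Chars.startswith s [' ', ' '] || PySem.Chars.startswith s ['\t']) = true
            · simp [h0, hsw, pvFlush]
              by_cases hcur : cur = [] <;> simp [hcur]
            · simp [h0, hsw, h, pvFlush]
              by_cases hcur : cur = [] <;> simp [hcur]
      rw [hstep, ih (paras ++ pvFlush cur ++ [s]) []]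
      simp [pvReflowWith, hc]

-- ===== VERDICT (by name: the statement is the Claim_ definition above) =====
theorem format_game_output_py_spec : Claim_equal_format_game_output_py := by
  intro text _
  unfold Spec_format_game_output_py
  have h := pvFoldA_inv (PySem.Chars.splitOn (PySem.Chars.strip text.toList) ['\n']) [] []
  simp only [List.nil_append, pvReflowWith_nil_eq] at h
  exact congrArg (fun p => String.ofList (PySem.Chars.join ['\n'] p)) h
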